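-- pv_equiv track=rewrite | github.com/vinchinzu/euler | python/375.py | compute_spans
-- ===== SOURCE A (Python) =====
-- def compute_spans(sequence: list[int]) -> tuple[list[int], list[int]]:
--     """Compute span bounds where each element is the minimum in its subarrays.
--
--     The input sequence is expected to use 1-based logical indexing, i.e.:
--     - sequence[0] is a padding element (e.g., None),
--     - sequence[1..n] are the actual S values.
--
--     Returns (left, right):
--     - left[k]: smallest index i such that sequence[k] is the minimum in [i, k],
--     - right[k]: largest index j such that sequence[k] is the minimum in [k, j].
--     """
--     n: int = len(sequence) - 1
--
--     left: list[int] = [1] * (n + 1)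
--     stack: list[int] = []
--
--     # Previous strictly smaller element to the left
--     for k in range(1, n + 1):
--         while stack and sequence[stack[-1]] >= sequence[k]:
--             stack.pop()
--         left[k] = 1 if not stack else stack[-1] + 1
--         stack.append(k)
--
--     right: list[int] = [n] * (n + 1)
--     stack = []
--
--     # Next smaller-or-equal element to the right
--     for k in range(n, 0, -1):
--         while stack and sequence[stack[-1]] > sequence[k]:
--             stack.pop()
--         right[k] = n if not stack else stack[-1] - 1
--         stack.append(k)
--
--     return left, right
-- ===== SOURCE B (Python) =====
-- def compute_spans(sequence):
--     """Jump-pointer version: no stacks; the partially built left/right arrays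
--     themselves let each inner loop skip whole resolved blocks."""
--     n = len(sequence) - 1
--
--     left = [1] * (n + 1)
--     for k in range(1, n + 1):
--         j = k - 1
--         while j >= 1 and sequence[j] >= sequence[k]:
--             j = left[j] - 1
--         left[k] = j + 1
--
--     right = [n] * (n + 1)
--     for k in range(n, 0, -1):
--         j = k + 1
--         while j <= n and sequence[j] > sequence[k]:
--             j = right[j] + 1
--         right[k] = j - 1
--
--     return left, right
-- ===== Notes on version B (the rewrite author's own statement) =====
-- stated objective: alternative
-- what changed: Both monotonic-stack passes are replaced by jump-pointer passes: no stack is kept; the partially built left/right arrays themselves are followed (j = left[j]-1 / j = right[j]+1) to skip whole resolved blocks, with the same O(n) amortized work.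
import Mathlib
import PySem

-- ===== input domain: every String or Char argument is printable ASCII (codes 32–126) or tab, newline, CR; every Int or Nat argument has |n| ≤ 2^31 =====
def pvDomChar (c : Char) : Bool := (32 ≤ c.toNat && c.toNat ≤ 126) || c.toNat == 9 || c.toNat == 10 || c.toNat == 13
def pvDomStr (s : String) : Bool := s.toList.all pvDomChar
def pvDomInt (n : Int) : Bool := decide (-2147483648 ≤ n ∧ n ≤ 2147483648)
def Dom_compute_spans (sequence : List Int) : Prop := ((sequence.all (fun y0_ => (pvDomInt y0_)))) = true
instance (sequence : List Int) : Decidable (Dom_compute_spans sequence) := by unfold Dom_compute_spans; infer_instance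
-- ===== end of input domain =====

-- B replaces A's two monotonic-stack passes by jump-pointer passes that follow the
-- partially built left/right arrays instead of a stack (same O(n) amortized cost).

-- total indexing wrapper: every access made by either port is in range
def pvGetI (xs : List Int) (i : Int) : Int := PySem.List.pyGetD xs i 0

-- ===== PORT A =====
-- while stack and sequence[stack[-1]] >= sequence[k]: stack.pop()   (stack head = top)
def pvPopL (seq : List Int) (v : Int) : List Int → List Int
  | [] => []
  | t :: rest => if pvGetI seq t ≥ v then pvPopL seq v rest else t :: rest

def pvStepAL (seq : List Int) (st : List Int × List Int) (k : Int) : List Int × List Int :=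
  let stack := pvPopL seq (pvGetI seq k) st.2
  (PySem.List.pySetD st.1 k (match stack with | [] => (1 : Int) | t :: _ => t + 1), k :: stack)

-- while stack and sequence[stack[-1]] > sequence[k]: stack.pop()
def pvPopR (seq : List Int) (v : Int) : List Int → List Int
  | [] => []
  | t :: rest => if pvGetI seq t > v then pvPopR seq v rest else t :: rest

def pvStepAR (seq : List Int) (n : Int) (st : List Int × List Int) (k : Int) : List Int × List Int :=
  let stack := pvPopR seq (pvGetI seq k) st.2
  (PySem.List.pySetD st.1 k (match stack with | [] => n | t :: _ => t - 1), k :: stack)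

def compute_spans (sequence : List Int) : List Int × List Int :=
  let n : Int := sequence.length - 1
  let left := ((PySem.List.pyRange 1 (n+1) 1).foldl (pvStepAL sequence)
      (List.replicate (n+1).toNat 1, [])).1
  let right := ((PySem.List.pyRange n 0 (-1)).foldl (pvStepAR sequence n)
      (List.replicate (n+1).toNat n, [])).1
  (left, right)

-- ===== PORT B =====
-- while j >= 1 and sequence[j] >= sequence[k]: j = left[j] - 1
-- fuel k.toNat is a pure termination guard: j strictly decreases from k-1, so < k iterations occur
def pvJumpL (seq left : List Int) (v : Int) : Nat → Int → Int
  | 0, j => j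
  | f+1, j => if 1 ≤ j ∧ pvGetI seq j ≥ v then pvJumpL seq left v f (pvGetI left j - 1) else j

def pvStepBL (seq : List Int) (left : List Int) (k : Int) : List Int :=
  PySem.List.pySetD left k (pvJumpL seq left (pvGetI seq k) k.toNat (k - 1) + 1)

-- while j <= n and sequence[j] > sequence[k]: j = right[j] + 1
-- fuel (n+1-k).toNat is a pure termination guard: j strictly increases from k+1 up to at most n+1
def pvJumpR (seq right : List Int) (n v : Int) : Nat → Int → Int
  | 0, j => j
  | f+1, j => if j ≤ n ∧ pvGetI seq j > v then pvJumpR seq right n v f (pvGetI right j + 1) else j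

def pvStepBR (seq : List Int) (n : Int) (right : List Int) (k : Int) : List Int :=
  PySem.List.pySetD right k (pvJumpR seq right n (pvGetI seq k) (n + 1 - k).toNat (k + 1) - 1)

def compute_spans_alt (sequence : List Int) : List Int × List Int :=
  let n : Int := sequence.length - 1
  let left := (PySem.List.pyRange 1 (n+1) 1).foldl (pvStepBL sequence)
      (List.replicate (n+1).toNat 1)
  let right := (PySem.List.pyRange n 0 (-1)).foldl (pvStepBR sequence n)
      (List.replicate (n+1).toNat n)
  (left, right)

-- ===== PRECONDITION & SPEC =====
def Spec_compute_spans (sequence : List Int) (out : List Int × List Int) : Prop := out = compute_spans_alt sequence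
instance (sequence : List Int) (out : List Int × List Int) : Decidable (Spec_compute_spans sequence out) := by unfold Spec_compute_spans; infer_instance

-- ===== CLAIM (what is proved, stated in full; the proofs are below) =====
def Claim_equal_compute_spans : Prop := ∀ (sequence : List Int), Dom_compute_spans sequence → Spec_compute_spans sequence (compute_spans sequence)

-- ===== LEMMAS AND PROOFS =====

-- A's stack (top first) is always the jump chain of its top index through `left`
inductive PvChainL (left : List Int) : Int → List Int → Prop
  | nil : PvChainL left 0 []
  | cons (j : Int) (rest : List Int) : 1 ≤ j → pvGetI left j - 1 < j →
      PvChainL left (pvGetI left j - 1) rest → PvChainL left j (j :: rest)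

inductive PvChainR (right : List Int) (n : Int) : Int → List Int → Prop
  | nil : PvChainR right n (n+1) []
  | cons (j : Int) (rest : List Int) : j ≤ n → j < pvGetI right j + 1 →
      PvChainR right n (pvGetI right j + 1) rest → PvChainR right n j (j :: rest)

lemma pvGetI_pySetD (xs : List Int) (m i v : Int) (hm : 0 ≤ m) (hi : 0 ≤ i)
    (hlen : i < xs.length) :
    pvGetI (PySem.List.pySetD xs m v) i = if i = m then v else pvGetI xs i := by
  rw [PySem.List.pySetD_of_nonneg xs v hm]
  unfold pvGetI
  rw [PySem.List.pyGetD_eq_getElem (xs.set m.toNat v) 0 hi (by simpa using hlen),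
      PySem.List.pyGetD_eq_getElem xs 0 hi hlen]
  rw [List.getElem_set]
  by_cases him : i = m
  · simp [him]
  · rw [if_neg him, if_neg (show ¬ m.toNat = i.toNat by omega)]

lemma pvChainL_shape {left : List Int} {j : Int} {st : List Int}
    (h : PvChainL left j st) : (j = 0 ∧ st = []) ∨ (1 ≤ j ∧ ∃ rest, st = j :: rest) := by
  cases h with
  | nil => exact Or.inl ⟨rfl, rfl⟩
  | cons j rest h1 h2 h3 => exact Or.inr ⟨h1, rest, rfl⟩

lemma pvChainL_len {left : List Int} {j : Int} {st : List Int}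
    (h : PvChainL left j st) : (st.length : Int) ≤ j := by
  induction h with
  | nil => simp
  | cons j rest h1 h2 h3 ih => simp only [List.length_cons]; push_cast; omega

lemma pvChainL_nonneg {left : List Int} {j : Int} {st : List Int}
    (h : PvChainL left j st) : 0 ≤ j := by
  rcases pvChainL_shape h with ⟨h1, _⟩ | ⟨h1, _⟩ <;> omega

lemma pvJumpL_zero (seq left : List Int) (v : Int) (f : Nat) :
    pvJumpL seq left v f 0 = 0 := by
  cases f with
  | zero => rfl
  | succ f => simp [pvJumpL]

lemma pvChainL_set {left : List Int} (m v : Int) (hm0 : 0 ≤ m)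
    (hmlen : m ≤ (left.length : Int)) :
    ∀ {j : Int} {st : List Int}, PvChainL left j st → j < m →
    PvChainL (PySem.List.pySetD left m v) j st := by
  intro j st h
  induction h with
  | nil => intro _; exact PvChainL.nil
  | cons j rest h1 h2 h3 ih =>
    intro hj
    have hg : pvGetI (PySem.List.pySetD left m v) j = pvGetI left j := by
      rw [pvGetI_pySetD left m j v hm0 (by omega) (by omega)]
      simp [show j ≠ m by omega]
    refine PvChainL.cons j rest h1 ?_ ?_
    · rw [hg]; exact h2
    · rw [hg]; exact ih (by omega)

lemma pop_jumpL (seq left : List Int) (v : Int) {j : Int} {st : List Int}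
    (h : PvChainL left j st) : ∀ f : Nat, st.length ≤ f →
    pvJumpL seq left v f j ≤ j ∧ PvChainL left (pvJumpL seq left v f j) (pvPopL seq v st) := by
  induction h with
  | nil =>
    intro f _
    rw [pvJumpL_zero]
    exact ⟨le_refl 0, PvChainL.nil⟩
  | cons j rest h1 h2 h3 ih =>
    intro f hf
    cases f with
    | zero => simp at hf
    | succ f =>
      by_cases hc : pvGetI seq j ≥ v
      · have hj : pvJumpL seq left v (f+1) j = pvJumpL seq left v f (pvGetI left j - 1) := by
          simp [pvJumpL, h1, hc]
        have hp : pvPopL seq v (j :: rest) = pvPopL seq v rest := by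
          simp [pvPopL, hc]
        obtain ⟨ha, hb⟩ := ih f (by simpa using hf)
        rw [hj, hp]
        exact ⟨by omega, hb⟩
      · have hj : pvJumpL seq left v (f+1) j = j := by
          simp [pvJumpL, hc]
        have hp : pvPopL seq v (j :: rest) = j :: rest := by
          simp [pvPopL, hc]
        rw [hj, hp]
        exact ⟨le_refl j, PvChainL.cons j rest h1 h2 h3⟩

-- mirror lemmas for the right pass
lemma pvChainR_shape {right : List Int} {n j : Int} {st : List Int}
    (h : PvChainR right n j st) : (j = n + 1 ∧ st = []) ∨ (j ≤ n ∧ ∃ rest, st = j :: rest) := by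
  cases h with
  | nil => exact Or.inl ⟨rfl, rfl⟩
  | cons j rest h1 h2 h3 => exact Or.inr ⟨h1, rest, rfl⟩

lemma pvChainR_len {right : List Int} {n j : Int} {st : List Int}
    (h : PvChainR right n j st) : (st.length : Int) ≤ n + 1 - j := by
  induction h with
  | nil => simp
  | cons j rest h1 h2 h3 ih => simp only [List.length_cons]; push_cast; omega

lemma pvJumpR_top (seq right : List Int) (n v : Int) (f : Nat) :
    pvJumpR seq right n v f (n+1) = n+1 := by
  cases f with
  | zero => rfl
  | succ f => simp [pvJumpR]

lemma pvChainR_set {right : List Int} {n : Int} (m v : Int) (hm0 : 0 ≤ m)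
    (hnlen : n < (right.length : Int)) :
    ∀ {j : Int} {st : List Int}, PvChainR right n j st → m < j →
    PvChainR (PySem.List.pySetD right m v) n j st := by
  intro j st h
  induction h with
  | nil => intro _; exact PvChainR.nil
  | cons j rest h1 h2 h3 ih =>
    intro hj
    have hg : pvGetI (PySem.List.pySetD right m v) j = pvGetI right j := by
      rw [pvGetI_pySetD right m j v hm0 (by omega) (by omega)]
      simp [show j ≠ m by omega]
    refine PvChainR.cons j rest h1 ?_ ?_
    · rw [hg]; exact h2
    · rw [hg]; exact ih (by omega)

lemma pop_jumpR (seq right : List Int) (n v : Int) {j : Int} {st : List Int}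
    (h : PvChainR right n j st) : ∀ f : Nat, st.length ≤ f →
    j ≤ pvJumpR seq right n v f j ∧ PvChainR right n (pvJumpR seq right n v f j) (pvPopR seq v st) := by
  induction h with
  | nil =>
    intro f _
    rw [pvJumpR_top]
    exact ⟨le_refl _, PvChainR.nil⟩
  | cons j rest h1 h2 h3 ih =>
    intro f hf
    cases f with
    | zero => simp at hf
    | succ f =>
      by_cases hc : pvGetI seq j > v
      · have hj : pvJumpR seq right n v (f+1) j = pvJumpR seq right n v f (pvGetI right j + 1) := by
          simp [pvJumpR, h1, hc]
        have hp : pvPopR seq v (j :: rest) = pvPopR seq v rest := by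
          simp [pvPopR, hc]
        obtain ⟨ha, hb⟩ := ih f (by simpa using hf)
        rw [hj, hp]
        exact ⟨by omega, hb⟩
      · have hj : pvJumpR seq right n v (f+1) j = j := by
          simp [pvJumpR, hc]
        have hp : pvPopR seq v (j :: rest) = j :: rest := by
          simp [pvPopR, hc]
        rw [hj, hp]
        exact ⟨le_refl j, PvChainR.cons j rest h1 h2 h3⟩

lemma passL (seq : List Int) (N : Int) (hN : N = (seq.length : Int)) :
    ∀ (m : Nat) (k : Int), N - k ≤ (m : Int) → 1 ≤ k →
    ∀ (left stack : List Int), left.length = seq.length → PvChainL left (k-1) stack →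
    ((PySem.List.pyRange k N 1).foldl (pvStepAL seq) (left, stack)).1
      = (PySem.List.pyRange k N 1).foldl (pvStepBL seq) left := by
  intro m
  induction m with
  | zero =>
    intro k hk _ left stack _ _
    rw [PySem.List.pyRange_one_eq_nil (by omega)]
    rfl
  | succ m ih =>
    intro k hk hk1 left stack hlen hch
    by_cases hkN : k < N
    · rw [PySem.List.pyRange_one_cons hkN]
      simp only [List.foldl_cons]
      have hlenstack : stack.length ≤ k.toNat := by
        have := pvChainL_len hch; omega
      obtain ⟨hle, hch'⟩ := pop_jumpL seq left (pvGetI seq k) hch k.toNat hlenstack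
      have hval : (match pvPopL seq (pvGetI seq k) stack with
          | [] => (1 : Int) | t :: _ => t + 1)
          = pvJumpL seq left (pvGetI seq k) k.toNat (k - 1) + 1 := by
        rcases pvChainL_shape hch' with ⟨hz, he⟩ | ⟨_, rest, he⟩
        · simp [he, hz]
        · simp [he]
      have hstep : pvStepAL seq (left, stack) k
          = (pvStepBL seq left k, k :: pvPopL seq (pvGetI seq k) stack) := by
        simp only [pvStepAL, pvStepBL]
        rw [hval]
      rw [hstep]
      have hk0 : (0 : Int) ≤ k := by omega
      have hkl : k < (left.length : Int) := by rw [hlen]; omega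
      have hj0 : 0 ≤ pvJumpL seq left (pvGetI seq k) k.toNat (k - 1) :=
        pvChainL_nonneg hch'
      have hgk : pvGetI (pvStepBL seq left k) k
          = pvJumpL seq left (pvGetI seq k) k.toNat (k - 1) + 1 := by
        simp only [pvStepBL]
        rw [pvGetI_pySetD left k k _ hk0 hk0 hkl]
        simp
      apply ih (k+1) (by omega) (by omega)
      · simp only [pvStepBL, PySem.List.length_pySetD]; exact hlen
      · have hs : PvChainL (pvStepBL seq left k)
            (pvJumpL seq left (pvGetI seq k) k.toNat (k - 1))
            (pvPopL seq (pvGetI seq k) stack) := by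
          simp only [pvStepBL]
          exact pvChainL_set k _ hk0 (by omega) hch' (by omega)
        have : k + 1 - 1 = k := by omega
        rw [this]
        refine PvChainL.cons k _ hk1 ?_ ?_
        · rw [hgk]; omega
        · rw [hgk]
          simpa using hs
    · rw [PySem.List.pyRange_one_eq_nil (by omega)]
      rfl

lemma passR (seq : List Int) (n : Int) (hn : n = (seq.length : Int) - 1) :
    ∀ (m : Nat) (k : Int), k ≤ (m : Int) → k ≤ n →
    ∀ (right stack : List Int), right.length = seq.length → PvChainR right n (k+1) stack →
    ((PySem.List.pyRange k 0 (-1)).foldl (pvStepAR seq n) (right, stack)).1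
      = (PySem.List.pyRange k 0 (-1)).foldl (pvStepBR seq n) right := by
  intro m
  induction m with
  | zero =>
    intro k hk _ right stack _ _
    rw [PySem.List.pyRange_neg_one_eq_nil (by omega)]
    rfl
  | succ m ih =>
    intro k hk hkn right stack hlen hch
    by_cases hk0 : 0 < k
    · rw [PySem.List.pyRange_neg_one_cons hk0]
      simp only [List.foldl_cons]
      have hlenstack : stack.length ≤ (n + 1 - k).toNat := by
        have := pvChainR_len hch; omega
      obtain ⟨hle, hch'⟩ := pop_jumpR seq right n (pvGetI seq k) hch _ hlenstack
      have hval : (match pvPopR seq (pvGetI seq k) stack with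
          | [] => n | t :: _ => t - 1)
          = pvJumpR seq right n (pvGetI seq k) (n + 1 - k).toNat (k + 1) - 1 := by
        rcases pvChainR_shape hch' with ⟨hz, he⟩ | ⟨_, rest, he⟩
        · simp [he, hz]
        · simp [he]
      have hstep : pvStepAR seq n (right, stack) k
          = (pvStepBR seq n right k, k :: pvPopR seq (pvGetI seq k) stack) := by
        simp only [pvStepAR, pvStepBR]
        rw [hval]
      rw [hstep]
      have hknn : (0 : Int) ≤ k := by omega
      have hkl : k < (right.length : Int) := by rw [hlen]; omega
      have hnl : n < (right.length : Int) := by rw [hlen]; omega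
      have hgk : pvGetI (pvStepBR seq n right k) k
          = pvJumpR seq right n (pvGetI seq k) (n + 1 - k).toNat (k + 1) - 1 := by
        simp only [pvStepBR]
        rw [pvGetI_pySetD right k k _ hknn hknn hkl]
        simp
      apply ih (k-1) (by omega) (by omega)
      · simp only [pvStepBR, PySem.List.length_pySetD]; exact hlen
      · have hs : PvChainR (pvStepBR seq n right k) n
            (pvJumpR seq right n (pvGetI seq k) (n + 1 - k).toNat (k + 1))
            (pvPopR seq (pvGetI seq k) stack) := by
          simp only [pvStepBR]
          exact pvChainR_set k _ hknn hnl hch' (by omega)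
        have : k - 1 + 1 = k := by omega
        rw [this]
        refine PvChainR.cons k _ hkn ?_ ?_
        · rw [hgk]; omega
        · rw [hgk]
          have h2 : pvJumpR seq right n (pvGetI seq k) (n + 1 - k).toNat (k + 1) - 1 + 1
              = pvJumpR seq right n (pvGetI seq k) (n + 1 - k).toNat (k + 1) := by omega
          rw [h2]
          exact hs
    · rw [PySem.List.pyRange_neg_one_eq_nil (by omega)]
      rfl

-- ===== VERDICT (by name: the statement is the Claim_ definition above) =====
theorem compute_spans_spec : Claim_equal_compute_spans := by
  intro seq _
  unfold Spec_compute_spans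
  have hN : (seq.length : Int) - 1 + 1 = (seq.length : Int) := by omega
  have hlenL : (List.replicate ((seq.length : Int) - 1 + 1).toNat (1 : Int)).length
      = seq.length := by simp [hN]
  have hlenR : (List.replicate ((seq.length : Int) - 1 + 1).toNat ((seq.length : Int) - 1)).length
      = seq.length := by simp [hN]
  have hL := passL seq ((seq.length : Int) - 1 + 1) hN seq.length 1 (by omega) (by omega)
      (List.replicate ((seq.length : Int) - 1 + 1).toNat 1) [] hlenL
      (by norm_num; exact PvChainL.nil)
  have hR := passR seq ((seq.length : Int) - 1) rfl seq.length ((seq.length : Int) - 1)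
      (by omega) (by omega)
      (List.replicate ((seq.length : Int) - 1 + 1).toNat ((seq.length : Int) - 1)) []
      hlenR PvChainR.nil
  simp only [compute_spans, compute_spans_alt]
  rw [hL, hR]
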